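-- pv_equiv track=rewrite | github.com/zn09224/Problem-Solving-in-Python | Implementing Searching Algorithms/Question6.py | update_record
-- ===== SOURCE A (Python) =====
-- def update_record(student_records, ID, record_title, data):
--
--     if record_title == "ID":
--         return "ID cannot be updated"
--
--     l = 0
--     h = len(student_records) - 1
--     found = None
--
--     while l <= h:
--         m = (l + h) // 2
--         if student_records[m][0] == ID:
--             found = m
--             break
--         elif ID < student_records[m][0]:
--             h = m - 1
--         else:
--             l = m + 1
--
--     if found == None:
--         return "Record not found"
--
--     if record_title == "Email":
--         student_records[found] = (student_records[found][0], data, student_records[found][2], student_records[found][3])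
--     elif record_title == "Mid1":
--         student_records[found] = (student_records[found][0], student_records[found][1], data, student_records[found][3])
--     elif record_title == "Mid2":
--         student_records[found] = (student_records[found][0], student_records[found][1], student_records[found][2], data)
--
--     return "Record updated"
-- ===== SOURCE B (Python) =====
-- def _find(segment, ID):
--     """Divide-and-conquer binary search on a list slice.
--
--     Returns the index of ID's record inside segment, or None.  The probe
--     position (len(segment) - 1) // 2 is the lower middle of the slice, so the
--     sequence of probed records is identical to an l/h index search.
--     """
--     if not segment:
--         return None
--     m = (len(segment) - 1) // 2
--     if segment[m][0] == ID:
--         return m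
--     if ID < segment[m][0]:
--         return _find(segment[:m], ID)
--     sub = _find(segment[m + 1:], ID)
--     return None if sub is None else m + 1 + sub
--
--
-- _FIELD = {"Email": 1, "Mid1": 2, "Mid2": 3}
--
--
-- def update_record(student_records, ID, record_title, data):
--     if record_title == "ID":
--         return "ID cannot be updated"
--     idx = _find(student_records, ID)
--     if idx is None:
--         return "Record not found"
--     pos = _FIELD.get(record_title)
--     if pos is not None:
--         rec = student_records[idx]
--         student_records[idx] = rec[:pos] + (data,) + rec[pos + 1:]
--     return "Record updated"
-- ===== Notes on version B (the rewrite author's own statement) =====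
-- stated objective: alternative
-- what changed: Replaces the iterative l/h index binary search with break and a found flag by a divide-and-conquer search that recurses on list slices (segment[:m] / segment[m+1:]) with the slice's lower-middle probe, and replaces the Email/Mid1/Mid2 elif chain by a field-position table with a tuple slice rebuild.
import Mathlib
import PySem

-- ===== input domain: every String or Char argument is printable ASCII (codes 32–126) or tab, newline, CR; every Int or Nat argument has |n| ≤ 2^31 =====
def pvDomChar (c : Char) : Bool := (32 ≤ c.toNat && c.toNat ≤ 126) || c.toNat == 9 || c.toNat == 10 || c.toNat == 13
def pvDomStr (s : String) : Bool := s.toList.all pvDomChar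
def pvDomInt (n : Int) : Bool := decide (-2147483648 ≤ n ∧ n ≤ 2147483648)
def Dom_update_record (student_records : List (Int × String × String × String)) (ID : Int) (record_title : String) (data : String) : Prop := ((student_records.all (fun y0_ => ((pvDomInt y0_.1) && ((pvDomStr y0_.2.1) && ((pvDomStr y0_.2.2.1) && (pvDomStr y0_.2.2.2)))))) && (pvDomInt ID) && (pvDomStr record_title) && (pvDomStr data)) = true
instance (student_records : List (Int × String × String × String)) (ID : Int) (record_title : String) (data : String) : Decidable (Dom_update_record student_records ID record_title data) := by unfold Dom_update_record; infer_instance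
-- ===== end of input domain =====

-- B replaces A's iterative l/h index binary search (found flag, break) by a divide-and-conquer
-- search recursing on list slices, and the elif field chain by a position table; objective:
-- alternative decomposition. Both A and B mutate student_records in place on the
-- Email/Mid1/Mid2 branches (identically); the equivalence proved here is about the RETURN
-- value only, so those assignments, which never affect the return, carry no computational
-- content in either port.

-- ===== PORT A =====
-- `while l <= h:` with a `found` flag and `break`, ported as the obvious structural recursion on
-- the shrinking interval (m = (l + h) // 2 inlined at each use); pyGet? is a totality guard only.
def update_record_loop (student_records : List (Int × String × String × String)) (ID : Int)
    (l h : Int) : Option Int :=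
  if hle : l ≤ h then
    match PySem.List.pyGet? student_records (PySem.Int.floordiv (l + h) 2) with
    | none => none
    | some r =>
      if r.1 = ID then some (PySem.Int.floordiv (l + h) 2)      -- found = m; break
      else if ID < r.1 then
        update_record_loop student_records ID l (PySem.Int.floordiv (l + h) 2 - 1)  -- h = m - 1
      else
        update_record_loop student_records ID (PySem.Int.floordiv (l + h) 2 + 1) h  -- l = m + 1
  else none
termination_by (h - l + 1).toNat
decreasing_by
  · have := PySem.Int.floordiv_two_mid_bounds hle; omega
  · have := PySem.Int.floordiv_two_mid_bounds hle; omega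

def update_record (student_records : List (Int × String × String × String)) (ID : Int) (record_title : String) (data : String) : String :=
  if record_title = "ID" then "ID cannot be updated"
  else
    match update_record_loop student_records ID 0 ((student_records.length : Int) - 1) with
    | none => "Record not found"  -- found == None
    | some _ => "Record updated"  -- the elif chain on record_title only mutates in place

-- ===== PORT B =====
-- _find from Source B: divide-and-conquer on list slices; index within segment, or none
def find_slice (segment : List (Int × String × String × String)) (ID : Int) : Option Nat :=
  if hne : segment = [] then none
  else
    match segment[(segment.length - 1) / 2]? with
    | none => none       -- unreachable: (len - 1) / 2 < len on a nonempty segment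
    | some r =>
      if r.1 = ID then some ((segment.length - 1) / 2)
      else if ID < r.1 then find_slice (segment.take ((segment.length - 1) / 2)) ID
      else
        match find_slice (segment.drop ((segment.length - 1) / 2 + 1)) ID with
        | none => none
        | some sub => some ((segment.length - 1) / 2 + 1 + sub)
termination_by segment.length
decreasing_by
  · have : 0 < segment.length := List.length_pos_iff.mpr hne
    simp [List.length_take]; omega
  · have : 0 < segment.length := List.length_pos_iff.mpr hne
    simp [List.length_drop]; omega

def update_record_alt (student_records : List (Int × String × String × String)) (ID : Int) (record_title : String) (data : String) : String :=
  if record_title = "ID" then "ID cannot be updated"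
  else
    match find_slice student_records ID with
    | none => "Record not found"  -- idx is None
    | some _ => "Record updated"  -- _FIELD lookup + tuple slice rebuild only mutate in place

-- ===== PRECONDITION & SPEC =====
def Spec_update_record (student_records : List (Int × String × String × String)) (ID : Int) (record_title : String) (data : String) (out : String) : Prop := out = update_record_alt student_records ID record_title data
instance (student_records : List (Int × String × String × String)) (ID : Int) (record_title : String) (data : String) (out : String) : Decidable (Spec_update_record student_records ID record_title data out) := by unfold Spec_update_record; infer_instance

-- ===== CLAIM (what is proved, stated in full; the proofs are below) =====
def Claim_equal_update_record : Prop := ∀ (student_records : List (Int × String × String × String)) (ID : Int) (record_title : String) (data : String), Dom_update_record student_records ID record_title data → Spec_update_record student_records ID record_title data (update_record student_records ID record_title data)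

-- ===== LEMMAS AND PROOFS =====
-- A's loop on the interval [l, h] probes the same records as B's search on the slice
-- xs[l : h+1] (A's midpoint (l+h)//2 is offset (len-1)/2 into that slice), so the two
-- searches succeed on exactly the same inputs.
theorem loop_isNone_eq_find (xs : List (Int × String × String × String)) (ID : Int)
    (l h : Int) (hl : 0 ≤ l) (hh : h < (xs.length : Int)) :
    (update_record_loop xs ID l h).isNone
      = (find_slice ((xs.drop l.toNat).take (h - l + 1).toNat) ID).isNone := by
  revert hl hh
  fun_induction update_record_loop xs ID l h with
  | case1 l h hle hget =>
    intro hl hh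
    have hm := PySem.Int.floordiv_two_mid_bounds hle
    rw [PySem.Int.floordiv_eq_ediv_of_pos (by norm_num : (0:Int) < 2)] at hget hm
    rw [PySem.List.pyGet?_eq_none_iff] at hget
    exact absurd ⟨by omega, by omega⟩ hget
  | case2 l h hle r hget hr =>
    intro hl hh
    have hm := PySem.Int.floordiv_two_mid_bounds hle
    rw [PySem.Int.floordiv_eq_ediv_of_pos (by norm_num : (0:Int) < 2)] at hget hm ⊢
    have hlen : ((xs.drop l.toNat).take (h - l + 1).toNat).length = (h - l + 1).toNat := by
      simp [List.length_take, List.length_drop]; omega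
    have hne : ¬ ((xs.drop l.toNat).take (h - l + 1).toNat = []) := by
      intro he; rw [he] at hlen; simp at hlen; omega
    rw [PySem.List.pyGet?_of_nonneg xs (by omega)] at hget
    have hidx : ((xs.drop l.toNat).take (h - l + 1).toNat)[(((xs.drop l.toNat).take (h - l + 1).toNat).length - 1) / 2]? = some r := by
      rw [hlen, List.getElem?_take, List.getElem?_drop]
      rw [if_pos (by omega)]
      rw [show l.toNat + ((h - l + 1).toNat - 1) / 2 = ((l + h) / 2).toNat by omega]
      exact hget
    rw [find_slice, dif_neg hne, hidx]
    simp [hr]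
  | case3 l h hle r hget hr hlt ih =>
    intro hl hh
    have hm := PySem.Int.floordiv_two_mid_bounds hle
    rw [PySem.Int.floordiv_eq_ediv_of_pos (by norm_num : (0:Int) < 2)] at hget hm ih ⊢
    have hlen : ((xs.drop l.toNat).take (h - l + 1).toNat).length = (h - l + 1).toNat := by
      simp [List.length_take, List.length_drop]; omega
    have hne : ¬ ((xs.drop l.toNat).take (h - l + 1).toNat = []) := by
      intro he; rw [he] at hlen; simp at hlen; omega
    rw [PySem.List.pyGet?_of_nonneg xs (by omega)] at hget
    have hidx : ((xs.drop l.toNat).take (h - l + 1).toNat)[(((xs.drop l.toNat).take (h - l + 1).toNat).length - 1) / 2]? = some r := by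
      rw [hlen, List.getElem?_take, List.getElem?_drop]
      rw [if_pos (by omega)]
      rw [show l.toNat + ((h - l + 1).toNat - 1) / 2 = ((l + h) / 2).toNat by omega]
      exact hget
    rw [find_slice, dif_neg hne, hidx]
    simp only [hr, hlt, ite_false, hlen]
    have hseg : ((xs.drop l.toNat).take (h - l + 1).toNat).take (((h - l + 1).toNat - 1) / 2)
        = (xs.drop l.toNat).take ((l + h) / 2 - 1 - l + 1).toNat := by
      rw [List.take_take]
      congr 1
      omega
    rw [hseg]
    exact ih (by omega) (by omega)
  | case4 l h hle r hget hr hlt ih =>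
    intro hl hh
    have hm := PySem.Int.floordiv_two_mid_bounds hle
    rw [PySem.Int.floordiv_eq_ediv_of_pos (by norm_num : (0:Int) < 2)] at hget hm ih ⊢
    have hlen : ((xs.drop l.toNat).take (h - l + 1).toNat).length = (h - l + 1).toNat := by
      simp [List.length_take, List.length_drop]; omega
    have hne : ¬ ((xs.drop l.toNat).take (h - l + 1).toNat = []) := by
      intro he; rw [he] at hlen; simp at hlen; omega
    rw [PySem.List.pyGet?_of_nonneg xs (by omega)] at hget
    have hidx : ((xs.drop l.toNat).take (h - l + 1).toNat)[(((xs.drop l.toNat).take (h - l + 1).toNat).length - 1) / 2]? = some r := by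
      rw [hlen, List.getElem?_take, List.getElem?_drop]
      rw [if_pos (by omega)]
      rw [show l.toNat + ((h - l + 1).toNat - 1) / 2 = ((l + h) / 2).toNat by omega]
      exact hget
    rw [find_slice, dif_neg hne, hidx]
    simp only [hr, hlt, ite_false, hlen]
    have hseg : ((xs.drop l.toNat).take (h - l + 1).toNat).drop (((h - l + 1).toNat - 1) / 2 + 1)
        = (xs.drop ((l + h) / 2 + 1).toNat).take (h - ((l + h) / 2 + 1) + 1).toNat := by
      rw [List.drop_take, List.drop_drop]
      congr 1
      · omega
      · congr 1; omega
    rw [hseg, ih (by omega) hh]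
    cases find_slice ((xs.drop ((l + h) / 2 + 1).toNat).take (h - ((l + h) / 2 + 1) + 1).toNat) ID <;> simp
  | case5 l h hgt =>
    intro hl hh
    rw [show (h - l + 1).toNat = 0 by omega]
    simp [find_slice]

-- ===== VERDICT (by name: the statement is the Claim_ definition above) =====
theorem update_record_spec : Claim_equal_update_record := by
  intro xs ID record_title data _
  unfold Spec_update_record update_record update_record_alt
  by_cases ht : record_title = "ID"
  · simp [ht]
  · rw [if_neg ht, if_neg ht]
    have h := loop_isNone_eq_find xs ID 0 ((xs.length : Int) - 1) le_rfl (by omega)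
    rw [show ((0:Int).toNat) = 0 from rfl, List.drop_zero,
        show ((xs.length : Int) - 1 - 0 + 1).toNat = xs.length by omega, List.take_length] at h
    cases hA : update_record_loop xs ID 0 ((xs.length : Int) - 1) <;>
      cases hB : find_slice xs ID <;> simp_all
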